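-- pv_equiv track=rewrite | github.com/burningceramicsinmesary/leetcode-soluction | max_equal_freq.py | maxEqualFreq
-- ===== SOURCE A (Python) =====
-- from typing import List
--
-- def maxEqualFreq(nums: List[int]) -> int:
--     hash_map = {}
--     for num in nums:
--         if num in hash_map:
--             hash_map[num] += 1
--         else:
--             hash_map[num] = 1
--     length_nums = len(nums)
--     for i in range(-1, -1 * length_nums, -1):
--         hash_map_dict = {}
--         for key, value in hash_map.items():
--             if value in hash_map_dict:
--                 hash_map_dict[value] += 1
--             else:
--                 hash_map_dict[value] = 1
--         if len(hash_map_dict) == 1: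
--             if hash_map_dict.get(1):
--                 return length_nums + i + 1
--         if len(hash_map_dict) == 2:
--             if hash_map_dict.get(1) == 1:
--                 return length_nums + i + 1
--             max_value = max(hash_map_dict.keys())
--             min_value = min(hash_map_dict.keys())
--             if max_value - min_value == 1 and (hash_map_dict[max_value] == 1 or hash_map_dict[min_value] == 1):
--                 return length_nums + i + 1
--         if hash_map[nums[i]] - 1 == 0:
--             hash_map.pop(nums[i])
--         else:
--             hash_map[nums[i]] -= 1
--     else:
--         return 0
-- ===== SOURCE B (Python) =====
-- def maxEqualFreq(nums):
--     cnt = {}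
--     fre = {}  # frequency of frequencies, maintained incrementally
--     best = 0
--     for i, x in enumerate(nums):
--         c = cnt.get(x, 0)
--         if c > 0:
--             fre[c] -= 1
--             if fre[c] == 0:
--                 del fre[c]
--         cnt[x] = c + 1
--         fre[c + 1] = fre.get(c + 1, 0) + 1
--         if i >= 1:
--             if len(fre) == 1:
--                 if 1 in fre:
--                     best = i + 1
--             elif len(fre) == 2:
--                 a = min(fre)
--                 b = max(fre)
--                 if fre.get(1) == 1 or (b - a == 1 and (fre[b] == 1 or fre[a] == 1)):
--                     best = i + 1
--     return best
-- ===== Notes on version B (the rewrite author's own statement) =====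
-- stated objective: faster
-- what changed: Instead of building the full counter and scanning prefixes backwards, rebuilding the frequency-of-frequencies dict from scratch for every prefix, B does one forward pass that maintains the count map and the frequency-of-frequencies map incrementally and keeps the best qualifying prefix length.
import Mathlib
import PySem

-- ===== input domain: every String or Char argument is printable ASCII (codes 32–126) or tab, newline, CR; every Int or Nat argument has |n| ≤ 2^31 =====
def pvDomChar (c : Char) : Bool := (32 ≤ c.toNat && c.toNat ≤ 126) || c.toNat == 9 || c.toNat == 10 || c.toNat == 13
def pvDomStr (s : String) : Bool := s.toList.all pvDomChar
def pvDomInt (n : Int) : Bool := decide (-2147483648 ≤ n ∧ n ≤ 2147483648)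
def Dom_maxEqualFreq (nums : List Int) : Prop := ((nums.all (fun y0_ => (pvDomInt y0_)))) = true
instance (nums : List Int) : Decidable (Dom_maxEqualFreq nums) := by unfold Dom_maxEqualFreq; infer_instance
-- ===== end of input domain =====

-- B replaces A's backward prefix scan (which rebuilds the frequency-of-frequencies dict
-- from scratch for every prefix) by one forward pass maintaining both maps incrementally.


-- ===== PORT A =====
-- A's counting pattern "if k in d: d[k] += 1 else: d[k] = 1" (used on nums and on hash_map values)
def pvCountUp (d : PySem.Dict Int Int) (k : Int) : PySem.Dict Int Int :=
  if d.contains k then d.insert k (d.getD k 0 + 1) else d.insert k 1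

-- the 'for i in range(-1, -len(nums), -1)' loop with its early returns; state = hash_map
def pvALoop (nums : List Int) (n : Int) : List Int → PySem.Dict Int Int → Int
  | [], _ => 0
  | i :: rest, hm =>
    let hmd := hm.items.foldl (fun d p => pvCountUp d p.2) PySem.Dict.empty
    if hmd.size = 1 ∧ (hmd.get? 1).getD 0 ≠ 0 then n + i + 1
    else if hmd.size = 2 ∧ hmd.get? 1 = some 1 then n + i + 1
    else if hmd.size = 2 ∧
        ((PySem.List.max? hmd.keys id).getD 0 - (PySem.List.min? hmd.keys id).getD 0 = 1 ∧
         (hmd.getD ((PySem.List.max? hmd.keys id).getD 0) 0 = 1 ∨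
          hmd.getD ((PySem.List.min? hmd.keys id).getD 0) 0 = 1)) then n + i + 1
    else
      -- nums[i]: the index is always in range inside this loop (|i| < len(nums))
      let x := (PySem.List.pyGet? nums i).getD 0
      pvALoop nums n rest (if hm.getD x 0 - 1 = 0 then hm.erase x else hm.insert x (hm.getD x 0 - 1))

def maxEqualFreq (nums : List Int) : Int :=
  let hm := nums.foldl pvCountUp PySem.Dict.empty
  let n : Int := nums.length
  pvALoop nums n (PySem.List.pyRange (-1) (-n) (-1)) hm

-- ===== PORT B =====
-- one step of B's single forward pass; state = (cnt, fre, best)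
def pvBStep (st : PySem.Dict Int Int × PySem.Dict Int Int × Int) (p : Int × Int) :
    PySem.Dict Int Int × PySem.Dict Int Int × Int :=
  let cnt := st.1
  let fre := st.2.1
  let best := st.2.2
  let i := p.1
  let x := p.2
  let c := cnt.getD x 0
  let fre1 :=
    if 0 < c then
      let f := fre.insert c (fre.getD c 0 - 1)
      if f.getD c 0 = 0 then f.erase c else f
    else fre
  let cnt1 := cnt.insert x (c + 1)
  let fre2 := fre1.insert (c + 1) (fre1.getD (c + 1) 0 + 1)
  let best1 :=
    if 1 ≤ i then
      if fre2.size = 1 then (if fre2.contains 1 then i + 1 else best)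
      else if fre2.size = 2 then
        if fre2.get? 1 = some 1 ∨
            ((PySem.List.max? fre2.keys id).getD 0 - (PySem.List.min? fre2.keys id).getD 0 = 1 ∧
             (fre2.getD ((PySem.List.max? fre2.keys id).getD 0) 0 = 1 ∨
              fre2.getD ((PySem.List.min? fre2.keys id).getD 0) 0 = 1)) then i + 1
        else best
      else best
    else best
  (cnt1, fre2, best1)

def maxEqualFreq_alt (nums : List Int) : Int :=
  ((PySem.List.enumerate nums).foldl pvBStep (PySem.Dict.empty, PySem.Dict.empty, 0)).2.2

-- ===== PRECONDITION & SPEC =====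
def Spec_maxEqualFreq (nums : List Int) (out : Int) : Prop := out = maxEqualFreq_alt nums
instance (nums : List Int) (out : Int) : Decidable (Spec_maxEqualFreq nums out) := by unfold Spec_maxEqualFreq; infer_instance

-- ===== CLAIM (what is proved, stated in full; the proofs are below) =====
def Claim_equal_maxEqualFreq : Prop := ∀ (nums : List Int), Dom_maxEqualFreq nums → Spec_maxEqualFreq nums (maxEqualFreq nums)

-- ===== LEMMAS AND PROOFS =====
-- ===== basic dict facts not in the PySem book =====
theorem pv_get?_erase_self (d : PySem.Dict Int Int) (k : Int) : (d.erase k).get? k = none := by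
  simp [PySem.Dict.erase, PySem.Dict.get?, List.find?_eq_none]

theorem pv_get?_erase_of_ne (d : PySem.Dict Int Int) (k k' : Int) (h : k' ≠ k) :
    (d.erase k).get? k' = d.get? k' := by
  simp only [PySem.Dict.erase, PySem.Dict.get?]
  congr 1
  induction d.items with
  | nil => rfl
  | cons p rest ih =>
    by_cases hpk : p.1 = k
    · simp [List.filter_cons, hpk, List.find?_cons, Ne.symm h, ih]
    · by_cases hpk' : p.1 = k'
      · simp [hpk, hpk', List.find?_cons, h]
      · simp [List.filter_cons, hpk, hpk', List.find?_cons, ih]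

theorem pv_nodup_keys_erase (d : PySem.Dict Int Int) (k : Int) (h : d.keys.Nodup) :
    (d.erase k).keys.Nodup := by
  simp only [PySem.Dict.erase, PySem.Dict.keys] at *
  exact ((List.filter_sublist (l := d.items)).map _).nodup h

theorem pv_get?_counter (xs : List Int) (v : Int) :
    (PySem.Dict.counter xs).get? v = if v ∈ xs then some ((xs.count v : Int)) else none := by
  rcases h : (PySem.Dict.counter xs).get? v with _ | w
  · have hc : (PySem.Dict.counter xs).contains v = false := by
      rw [PySem.Dict.contains_eq_isSome_get?, h]; rfl
    rw [PySem.Dict.contains_counter] at hc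
    simp at hc
    simp [hc]
  · have hc : (PySem.Dict.counter xs).contains v = true := by
      rw [PySem.Dict.contains_eq_isSome_get?, h]; rfl
    rw [PySem.Dict.contains_counter] at hc
    simp at hc
    have : (PySem.Dict.counter xs).getD v 0 = w := by
      rw [PySem.Dict.getD_eq_get?_getD, h]; rfl
    rw [PySem.Dict.getD_counter] at this
    simp [hc, ← this]

theorem pv_counter_perm_get? {xs ys : List Int} (h : xs.Perm ys) (v : Int) :
    (PySem.Dict.counter xs).get? v = (PySem.Dict.counter ys).get? v := by
  rw [pv_get?_counter, pv_get?_counter, h.count_eq]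
  simp [h.mem_iff]

theorem pv_max?_isSome (x : Int) (xs : List Int) : (PySem.List.max? (x::xs) id).isSome := by
  simp only [PySem.List.max?]
  induction xs generalizing x with
  | nil => simp
  | cons y ys ih => simp only [List.foldl_cons]; split <;> apply ih

theorem pv_min?_isSome (x : Int) (xs : List Int) : (PySem.List.min? (x::xs) id).isSome := by
  simp only [PySem.List.min?]
  induction xs generalizing x with
  | nil => simp
  | cons y ys ih => simp only [List.foldl_cons]; split <;> apply ih

theorem pv_max?_perm {xs ys : List Int} (h : xs.Perm ys) :
    PySem.List.max? xs id = PySem.List.max? ys id := by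
  rcases xs with _ | ⟨a, as⟩
  · have : ys = [] := h.nil_eq.symm
    subst this; rfl
  · rcases ys with _ | ⟨b, bs⟩
    · exact absurd h.symm.nil_eq (by simp)
    · rcases hm : PySem.List.max? (a::as) id with _ | m
      · exact absurd hm (by have := pv_max?_isSome a as; intro hcon; rw [hcon] at this; simp at this)
      rcases hm' : PySem.List.max? (b::bs) id with _ | m'
      · exact absurd hm' (by have := pv_max?_isSome b bs; intro hcon; rw [hcon] at this; simp at this)
      have h1 : m ≤ m' := PySem.List.max?_isMax hm' m (h.mem_iff.mp (PySem.List.max?_mem hm))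
      have h2 : m' ≤ m := PySem.List.max?_isMax hm m' (h.mem_iff.mpr (PySem.List.max?_mem hm'))
      simp [le_antisymm h1 h2]

theorem pv_min?_perm {xs ys : List Int} (h : xs.Perm ys) :
    PySem.List.min? xs id = PySem.List.min? ys id := by
  rcases xs with _ | ⟨a, as⟩
  · have : ys = [] := h.nil_eq.symm
    subst this; rfl
  · rcases ys with _ | ⟨b, bs⟩
    · exact absurd h.symm.nil_eq (by simp)
    · rcases hm : PySem.List.min? (a::as) id with _ | m
      · exact absurd hm (by have := pv_min?_isSome a as; intro hcon; rw [hcon] at this; simp at this)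
      rcases hm' : PySem.List.min? (b::bs) id with _ | m'
      · exact absurd hm' (by have := pv_min?_isSome b bs; intro hcon; rw [hcon] at this; simp at this)
      have h1 : m ≤ m' := PySem.List.min?_id_le hm m' (h.mem_iff.mpr (PySem.List.min?_mem hm'))
      have h2 : m' ≤ m := PySem.List.min?_id_le hm' m (h.mem_iff.mp (PySem.List.min?_mem hm))
      simp [le_antisymm h2 h1]

-- ===== finite-map equality of dicts and invariance of the acceptance test =====
def pvCs (nums : List Int) (L : Nat) : List Int := (PySem.Dict.counter (nums.take L)).values
def pvFre (nums : List Int) (L : Nat) : PySem.Dict Int Int := PySem.Dict.counter (pvCs nums L)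

def pvEqv (d d' : PySem.Dict Int Int) : Prop :=
  d.keys.Nodup ∧ d'.keys.Nodup ∧ ∀ k, d.get? k = d'.get? k

def pvCond (d : PySem.Dict Int Int) : Prop :=
  (d.size = 1 ∧ (d.get? 1).getD 0 ≠ 0) ∨
  (d.size = 2 ∧ (d.get? 1 = some 1 ∨
    ((PySem.List.max? d.keys id).getD 0 - (PySem.List.min? d.keys id).getD 0 = 1 ∧
     (d.getD ((PySem.List.max? d.keys id).getD 0) 0 = 1 ∨
      d.getD ((PySem.List.min? d.keys id).getD 0) 0 = 1))))

noncomputable def pvBest (nums : List Int) : Nat → Int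
  | 0 => 0
  | (L + 1) => @ite _ (2 ≤ L + 1 ∧ pvCond (pvFre nums (L + 1))) (Classical.propDecidable _)
      ((L : Int) + 1) (pvBest nums L)

theorem pv_mem_keys_iff (d : PySem.Dict Int Int) (k : Int) :
    k ∈ d.keys ↔ (d.get? k).isSome = true := by
  rw [← PySem.Dict.contains_iff_mem_keys, PySem.Dict.contains_eq_isSome_get?]

theorem pv_eqv_keys_perm {d d' : PySem.Dict Int Int} (h : pvEqv d d') : d.keys.Perm d'.keys := by
  refine (List.perm_ext_iff_of_nodup h.1 h.2.1).mpr (fun k => ?_)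
  rw [pv_mem_keys_iff, pv_mem_keys_iff, h.2.2 k]

theorem pv_eqv_size {d d' : PySem.Dict Int Int} (h : pvEqv d d') : d.size = d'.size := by
  have := (pv_eqv_keys_perm h).length_eq
  simpa [PySem.Dict.keys, PySem.Dict.size] using this

theorem pv_cond_congr {d d' : PySem.Dict Int Int} (h : pvEqv d d') : pvCond d ↔ pvCond d' := by
  have hsz := pv_eqv_size h
  have hget := h.2.2
  have hgetD : ∀ k, d.getD k 0 = d'.getD k 0 := by
    intro k; rw [PySem.Dict.getD_eq_get?_getD, PySem.Dict.getD_eq_get?_getD, hget k]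
  have hmax : PySem.List.max? d.keys id = PySem.List.max? d'.keys id :=
    pv_max?_perm (pv_eqv_keys_perm h)
  have hmin : PySem.List.min? d.keys id = PySem.List.min? d'.keys id :=
    pv_min?_perm (pv_eqv_keys_perm h)
  unfold pvCond
  rw [hsz, hget, hmax, hmin, hgetD, hgetD]

theorem pv_eqv_refl (d : PySem.Dict Int Int) (h : d.keys.Nodup) : pvEqv d d := ⟨h, h, fun _ => rfl⟩

-- characterization of the canonical frequency-of-frequencies map
theorem pv_fre_get? (nums : List Int) (L : Nat) (v : Int) :
    (pvFre nums L).get? v = if v ∈ pvCs nums L then some (((pvCs nums L).count v : Int)) else none :=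
  pv_get?_counter _ v

theorem pv_fre_pos (nums : List Int) (L : Nat) (v w : Int) (h : (pvFre nums L).get? v = some w) :
    0 < w := by
  rw [pv_fre_get?] at h
  by_cases hm : v ∈ pvCs nums L
  · simp [hm] at h
    have := List.count_pos_iff.mpr hm
    omega
  · simp [hm] at h

-- ===== how the canonical count multiset evolves when one element is appended =====
theorem pv_cs_eq (nums : List Int) (L : Nat) :
    pvCs nums L = (PySem.Set.ofList (nums.take L)).map (fun k => (((nums.take L).count k : Int))) := by
  unfold pvCs
  have : (PySem.Dict.counter (nums.take L)).values =
      ((PySem.Dict.counter (nums.take L)).items).map (fun p => p.2) := rfl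
  rw [this, PySem.Dict.items_counter]
  simp [List.map_map]

theorem pv_take_succ (nums : List Int) (L : Nat) (h : L < nums.length) :
    nums.take (L + 1) = nums.take L ++ [nums[L]] := by
  rw [List.take_add_one]
  simp [List.getElem?_eq_getElem h]

theorem pv_count_append_singleton (l : List Int) (x k : Int) :
    (l ++ [x]).count k = l.count k + (if x = k then 1 else 0) := by
  simp [List.count_append, List.count_singleton]

theorem pv_cs_succ_not_mem (nums : List Int) (L : Nat) (h : L < nums.length)
    (hx : nums[L] ∉ nums.take L) :
    pvCs nums (L + 1) = pvCs nums L ++ [1] := by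
  rw [pv_cs_eq, pv_cs_eq, pv_take_succ nums L h]
  rw [PySem.Set.ofList_append_singleton, PySem.Set.add_of_not_mem (by
    exact fun hc => hx ((PySem.Set.mem_ofList _ _).mp hc))]
  rw [List.map_append]
  congr 1
  · apply List.map_congr_left
    intro k hk
    rw [PySem.Set.mem_ofList] at hk
    have : nums[L] ≠ k := fun hc => hx (hc ▸ hk)
    rw [pv_count_append_singleton]
    simp [this]
  · have h0 : (nums.take L).count nums[L] = 0 := List.count_eq_zero.mpr hx
    simp only [List.map_cons, List.map_nil]
    rw [pv_count_append_singleton]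
    simp [h0]

theorem pv_cs_succ_mem (nums : List Int) (L : Nat) (h : L < nums.length)
    (hx : nums[L] ∈ nums.take L) :
    ∃ S1 S2 : List Int,
      pvCs nums L = S1 ++ (((nums.take L).count nums[L] : Int)) :: S2 ∧
      pvCs nums (L + 1) = S1 ++ (((nums.take L).count nums[L] : Int) + 1) :: S2 := by
  have hset : nums[L] ∈ PySem.Set.ofList (nums.take L) := (PySem.Set.mem_ofList _ _).mpr hx
  obtain ⟨T1, T2, hT⟩ := List.mem_iff_append.mp hset
  have hnd : (PySem.Set.ofList (nums.take L)).Nodup := PySem.Set.nodup_ofList _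
  rw [hT] at hnd
  have hx1 : nums[L] ∉ T1 := by
    intro hc
    exact (List.disjoint_of_nodup_append hnd) hc (by simp)
  have hx2 : nums[L] ∉ T2 := by
    have := (List.nodup_append.mp hnd).2.1
    simp [List.nodup_cons] at this
    exact this.1
  refine ⟨T1.map (fun k => (((nums.take L).count k : Int))),
          T2.map (fun k => (((nums.take L).count k : Int))), ?_, ?_⟩
  · rw [pv_cs_eq, hT]; simp
  · rw [pv_cs_eq, pv_take_succ nums L h]
    rw [PySem.Set.ofList_append_singleton, PySem.Set.add_of_mem hset, hT]
    simp only [List.map_append, List.map_cons]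
    congr 1
    · apply List.map_congr_left
      intro k hk
      have hne : nums[L] ≠ k := fun hc => hx1 (hc ▸ hk)
      rw [pv_count_append_singleton]; simp [hne]
    · congr 1
      · rw [pv_count_append_singleton]; simp
      · apply List.map_congr_left
        intro k hk
        have hne : nums[L] ≠ k := fun hc => hx2 (hc ▸ hk)
        rw [pv_count_append_singleton]; simp [hne]

-- ===== the incremental/decremental dict updates track the canonical maps =====
theorem pv_fre_getD (nums : List Int) (L : Nat) (v : Int) :
    (pvFre nums L).getD v 0 = (((pvCs nums L).count v : Int)) := by
  rw [PySem.Dict.getD_eq_get?_getD, pv_fre_get?]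
  by_cases hm : v ∈ pvCs nums L
  · simp [hm]
  · simp [hm, List.count_eq_zero.mpr hm]

theorem pv_eqv_getD {d d' : PySem.Dict Int Int} (h : pvEqv d d') (k : Int) :
    d.getD k 0 = d'.getD k 0 := by
  rw [PySem.Dict.getD_eq_get?_getD, PySem.Dict.getD_eq_get?_getD, h.2.2 k]

theorem pv_take_mem (nums : List Int) (L : Nat) (h : L < nums.length) :
    nums[L] ∈ nums.take (L + 1) := by
  rw [pv_take_succ nums L h]
  exact List.mem_append.mpr (Or.inr (List.mem_singleton_self _))

theorem pv_take_count_self (nums : List Int) (L : Nat) (h : L < nums.length) :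
    (nums.take (L + 1)).count nums[L] = (nums.take L).count nums[L] + 1 := by
  rw [pv_take_succ nums L h, pv_count_append_singleton]; simp

theorem pv_take_count_ne (nums : List Int) (L : Nat) (h : L < nums.length)
    (k : Int) (hk : k ≠ nums[L]) :
    (nums.take (L + 1)).count k = (nums.take L).count k := by
  rw [pv_take_succ nums L h, pv_count_append_singleton]; simp [Ne.symm hk]

theorem pv_take_mem_ne (nums : List Int) (L : Nat) (h : L < nums.length)
    (k : Int) (hk : k ≠ nums[L]) :
    k ∈ nums.take (L + 1) ↔ k ∈ nums.take L := by
  rw [← List.count_pos_iff, ← List.count_pos_iff, pv_take_count_ne nums L h k hk]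

theorem pv_cnt_step (nums : List Int) (L : Nat) (h : L < nums.length)
    (cnt : PySem.Dict Int Int) (hE : pvEqv cnt (PySem.Dict.counter (nums.take L))) :
    pvEqv (cnt.insert nums[L] (cnt.getD nums[L] 0 + 1))
      (PySem.Dict.counter (nums.take (L + 1))) := by
  have hc : cnt.getD nums[L] 0 = (((nums.take L).count nums[L] : Int)) := by
    rw [pv_eqv_getD hE, PySem.Dict.getD_counter]
  refine ⟨PySem.Dict.nodup_keys_insert _ _ _ hE.1, PySem.Dict.nodup_keys_counter _, fun k => ?_⟩
  rw [PySem.Dict.get?_insert, pv_get?_counter]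
  by_cases hk : k = nums[L]
  · subst hk
    rw [if_pos rfl, if_pos (pv_take_mem nums L h), pv_take_count_self nums L h, hc]
    push_cast
    ring_nf
  · rw [if_neg hk, hE.2.2 k, pv_get?_counter, pv_take_count_ne nums L h k hk]
    simp [pv_take_mem_ne nums L h k hk]

theorem pv_dec_step (nums : List Int) (L : Nat) (h : L < nums.length)
    (hm : PySem.Dict Int Int) (hE : pvEqv hm (PySem.Dict.counter (nums.take (L + 1)))) :
    pvEqv (if hm.getD nums[L] 0 - 1 = 0 then hm.erase nums[L]
           else hm.insert nums[L] (hm.getD nums[L] 0 - 1))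
      (PySem.Dict.counter (nums.take L)) := by
  have hgd : hm.getD nums[L] 0 = (((nums.take (L + 1)).count nums[L] : Int)) := by
    rw [pv_eqv_getD hE, PySem.Dict.getD_counter]
  have hcnt := pv_take_count_self nums L h
  rw [hgd]
  by_cases h1 : (((nums.take (L + 1)).count nums[L] : Int)) - 1 = 0
  · rw [if_pos h1]
    have hc0 : (nums.take L).count nums[L] = 0 := by omega
    refine ⟨pv_nodup_keys_erase _ _ hE.1, PySem.Dict.nodup_keys_counter _, fun k => ?_⟩
    by_cases hk : k = nums[L]
    · subst hk
      rw [pv_get?_erase_self, pv_get?_counter]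
      simp [List.count_eq_zero.mp hc0]
    · rw [pv_get?_erase_of_ne _ _ _ hk, hE.2.2 k, pv_get?_counter, pv_get?_counter,
        pv_take_count_ne nums L h k hk]
      simp [pv_take_mem_ne nums L h k hk]
  · rw [if_neg h1]
    refine ⟨PySem.Dict.nodup_keys_insert _ _ _ hE.1, PySem.Dict.nodup_keys_counter _, fun k => ?_⟩
    rw [PySem.Dict.get?_insert, pv_get?_counter]
    by_cases hk : k = nums[L]
    · subst hk
      have hmem : nums[L] ∈ nums.take L := by
        rw [← List.count_pos_iff]; omega
      rw [if_pos rfl, if_pos hmem]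
      have : (((nums.take (L + 1)).count nums[L] : Int)) - 1 =
          (((nums.take L).count nums[L] : Int)) := by omega
      rw [this]
    · rw [if_neg hk, hE.2.2 k, pv_get?_counter, pv_take_count_ne nums L h k hk]
      simp [pv_take_mem_ne nums L h k hk]

-- ===== the incremental frequency-of-frequencies update tracks the canonical map =====
theorem pv_fre_step (nums : List Int) (L : Nat) (h : L < nums.length)
    (fre : PySem.Dict Int Int) (hE : pvEqv fre (pvFre nums L))
    (c : Int) (hc : c = (((nums.take L).count nums[L] : Int)))
    (f fre1 : PySem.Dict Int Int)
    (hf : f = fre.insert c (fre.getD c 0 - 1))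
    (hf1 : fre1 = if 0 < c then (if f.getD c 0 = 0 then f.erase c else f) else fre) :
    pvEqv (fre1.insert (c + 1) (fre1.getD (c + 1) 0 + 1)) (pvFre nums (L + 1)) := by
  have hfreGet : ∀ v, fre.get? v = (pvFre nums L).get? v := hE.2.2
  have hfreGetD : ∀ v, fre.getD v 0 = (((pvCs nums L).count v : Int)) := by
    intro v; rw [pv_eqv_getD hE, pv_fre_getD]
  by_cases hx : nums[L] ∈ nums.take L
  · -- seen before: one value moves from count c to count c+1
    have hcpos : 0 < c := by
      rw [hc]; exact_mod_cast List.count_pos_iff.mpr hx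
    obtain ⟨S1, S2, hcsL, hcs'⟩ := pv_cs_succ_mem nums L h hx
    rw [← hc] at hcsL hcs'
    have hcount_L : ∀ v, (pvCs nums L).count v =
        S1.count v + S2.count v + (if c = v then 1 else 0) := by
      intro v; rw [hcsL]
      by_cases hcv : c = v
      · subst hcv; simp [List.count_append, List.count_cons]; omega
      · simp [List.count_append, List.count_cons, hcv, Ne.symm hcv]
    have hcount' : ∀ v, (pvCs nums (L + 1)).count v =
        S1.count v + S2.count v + (if c + 1 = v then 1 else 0) := by
      intro v; rw [hcs']
      by_cases hcv : c + 1 = v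
      · subst hcv; simp [List.count_append, List.count_cons]; omega
      · simp [List.count_append, List.count_cons, hcv, Ne.symm hcv]
    have hne : c + 1 ≠ c := by omega
    have hfgdc : f.getD c 0 = ((S1.count c + S2.count c : Nat) : Int) := by
      rw [hf, PySem.Dict.getD_insert_self, hfreGetD, hcount_L c]
      simp
    have hf1gd : fre1.getD (c + 1) 0 = (((pvCs nums L).count (c + 1) : Int)) := by
      rw [hf1, if_pos hcpos]
      by_cases h0 : f.getD c 0 = 0
      · rw [if_pos h0, PySem.Dict.getD_eq_get?_getD, pv_get?_erase_of_ne _ _ _ hne, hf,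
          PySem.Dict.get?_insert, if_neg hne, ← PySem.Dict.getD_eq_get?_getD, hfreGetD]
      · rw [if_neg h0, hf, PySem.Dict.getD_insert, if_neg hne, hfreGetD]
    have hf1nodup : fre1.keys.Nodup := by
      rw [hf1, if_pos hcpos]
      split
      · exact pv_nodup_keys_erase _ _ (hf ▸ PySem.Dict.nodup_keys_insert _ _ _ hE.1)
      · exact hf ▸ PySem.Dict.nodup_keys_insert _ _ _ hE.1
    have hf1get_ne : ∀ v, v ≠ c → fre1.get? v = fre.get? v := by
      intro v hv
      rw [hf1, if_pos hcpos]
      by_cases h0 : f.getD c 0 = 0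
      · rw [if_pos h0, pv_get?_erase_of_ne _ _ _ hv, hf, PySem.Dict.get?_insert, if_neg hv]
      · rw [if_neg h0, hf, PySem.Dict.get?_insert, if_neg hv]
    have hf1get_c : fre1.get? c =
        (if 0 < S1.count c + S2.count c then some ((S1.count c + S2.count c : Nat) : Int) else none) := by
      rw [hf1, if_pos hcpos]
      by_cases h0 : f.getD c 0 = 0
      · rw [if_pos h0, pv_get?_erase_self]
        have : S1.count c + S2.count c = 0 := by
          rw [hfgdc] at h0; exact_mod_cast h0
        simp [this]
      · rw [if_neg h0, hf, PySem.Dict.get?_insert_self]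
        have hpos : 0 < S1.count c + S2.count c := by
          rw [hfgdc] at h0
          by_contra hcon
          exact h0 (by simp; omega)
        rw [if_pos hpos]
        have := hfreGetD c
        rw [hcount_L c] at this
        simp at this
        rw [this]
        congr 1
        push_cast
        ring
    refine ⟨PySem.Dict.nodup_keys_insert _ _ _ hf1nodup, PySem.Dict.nodup_keys_counter _, fun k => ?_⟩
    rw [PySem.Dict.get?_insert, pv_fre_get?]
    by_cases hk1 : k = c + 1
    · subst hk1
      rw [if_pos rfl, hf1gd]
      have hcnt' : (pvCs nums (L + 1)).count (c + 1) = S1.count (c + 1) + S2.count (c + 1) + 1 := by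
        rw [hcount' (c + 1)]; simp
      have hmem' : (c + 1) ∈ pvCs nums (L + 1) := by
        rw [← List.count_pos_iff]; omega
      rw [if_pos hmem', hcnt', hcount_L (c + 1), if_neg (show ¬c = c + 1 by omega)]
      push_cast
      ring_nf
    · rw [if_neg hk1]
      by_cases hkc : k = c
      · subst hkc
        rw [hf1get_c]
        have hcnt' : (pvCs nums (L + 1)).count k = S1.count k + S2.count k := by
          rw [hcount' k]; simp [Ne.symm hk1]
        by_cases hpos : 0 < S1.count k + S2.count k
        · have hmem' : k ∈ pvCs nums (L + 1) := by rw [← List.count_pos_iff]; omega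
          rw [if_pos hpos, if_pos hmem', hcnt']
        · have hmem' : k ∉ pvCs nums (L + 1) := by
            rw [← List.count_pos_iff] at *; omega
          rw [if_neg hpos, if_neg hmem']
      · rw [hf1get_ne k hkc, hfreGet k, pv_fre_get?]
        have hcnt' : (pvCs nums (L + 1)).count k = (pvCs nums L).count k := by
          rw [hcount' k, hcount_L k, if_neg (fun hh => hk1 hh.symm), if_neg (fun hh => hkc hh.symm)]
        have hmem' : k ∈ pvCs nums (L + 1) ↔ k ∈ pvCs nums L := by
          rw [← List.count_pos_iff, ← List.count_pos_iff, hcnt']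
        rw [hcnt']
        by_cases hm : k ∈ pvCs nums L
        · rw [if_pos hm, if_pos (hmem'.mpr hm)]
        · rw [if_neg hm, if_neg (fun hcon => hm (hmem'.mp hcon))]
  · -- first occurrence: a new value of count 1 appears
    have hc0 : c = 0 := by rw [hc, List.count_eq_zero.mpr hx]; simp
    have hf1e : fre1 = fre := by rw [hf1, if_neg (by omega)]
    have hcs' := pv_cs_succ_not_mem nums L h hx
    have hcnt' : ∀ v, (pvCs nums (L + 1)).count v =
        (pvCs nums L).count v + (if v = 1 then 1 else 0) := by
      intro v; rw [hcs', pv_count_append_singleton]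
      split <;> simp_all <;> omega
    clear hc
    subst hc0
    rw [hf1e]
    refine ⟨PySem.Dict.nodup_keys_insert _ _ _ hE.1, PySem.Dict.nodup_keys_counter _, fun k => ?_⟩
    rw [PySem.Dict.get?_insert, pv_fre_get?]
    by_cases hk : k = 0 + 1
    · subst hk
      rw [if_pos rfl]
      have hmem' : (0 : Int) + 1 ∈ pvCs nums (L + 1) := by
        rw [← List.count_pos_iff, hcnt']
        simp
      rw [if_pos hmem', hcnt', hfreGetD]
      simp
    · rw [if_neg hk, hfreGet k, pv_fre_get?]
      have hcntk : (pvCs nums (L + 1)).count k = (pvCs nums L).count k := by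
        rw [hcnt' k, if_neg (by simpa using hk)]
        omega
      have hmem' : k ∈ pvCs nums (L + 1) ↔ k ∈ pvCs nums L := by
        rw [← List.count_pos_iff, ← List.count_pos_iff, hcntk]
      rw [hcntk]
      by_cases hm : k ∈ pvCs nums L
      · rw [if_pos hm, if_pos (hmem'.mpr hm)]
      · rw [if_neg hm, if_neg (fun hcon => hm (hmem'.mp hcon))]

-- ===== B's inline decision is the canonical test; B computes the running best =====
theorem pv_contains_iff_truthy (nums : List Int) (L : Nat) (fre2 : PySem.Dict Int Int)
    (hE : pvEqv fre2 (pvFre nums L)) :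
    (fre2.contains 1 = true) ↔ (fre2.get? 1).getD 0 ≠ 0 := by
  rw [PySem.Dict.contains_eq_isSome_get?]
  rcases hg : fre2.get? 1 with _ | w
  · simp
  · have : 0 < w := pv_fre_pos nums L 1 w (by rw [← hE.2.2 1, hg])
    simp
    omega

theorem pv_bbest (nums : List Int) (L : Nat) (fre2 : PySem.Dict Int Int)
    (hE : pvEqv fre2 (pvFre nums (L + 1))) (best : Int) :
    (if 1 ≤ (L : Int) then
       if fre2.size = 1 then (if fre2.contains 1 then (L : Int) + 1 else best)
       else if fre2.size = 2 then
         (if fre2.get? 1 = some 1 ∨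
             ((PySem.List.max? fre2.keys id).getD 0 - (PySem.List.min? fre2.keys id).getD 0 = 1 ∧
              (fre2.getD ((PySem.List.max? fre2.keys id).getD 0) 0 = 1 ∨
               fre2.getD ((PySem.List.min? fre2.keys id).getD 0) 0 = 1)) then (L : Int) + 1
          else best)
       else best
     else best) = @ite _ (2 ≤ L + 1 ∧ pvCond (pvFre nums (L + 1))) (Classical.propDecidable _)
       ((L : Int) + 1) best := by
  have hdef : pvCond fre2 ↔
      (fre2.size = 1 ∧ (fre2.get? 1).getD 0 ≠ 0) ∨
      (fre2.size = 2 ∧ (fre2.get? 1 = some 1 ∨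
        ((PySem.List.max? fre2.keys id).getD 0 - (PySem.List.min? fre2.keys id).getD 0 = 1 ∧
         (fre2.getD ((PySem.List.max? fre2.keys id).getD 0) 0 = 1 ∨
          fre2.getD ((PySem.List.min? fre2.keys id).getD 0) 0 = 1)))) := Iff.rfl
  have hcont := pv_contains_iff_truthy nums (L + 1) fre2 hE
  have hcond := pv_cond_congr hE
  by_cases hL : 1 ≤ (L : Int)
  · have h2 : 2 ≤ L + 1 := by omega
    rw [if_pos hL]
    by_cases hc : pvCond (pvFre nums (L + 1))
    · rw [if_pos (show 2 ≤ L + 1 ∧ pvCond (pvFre nums (L + 1)) from ⟨h2, hc⟩)]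
      rcases hdef.mp (hcond.mpr hc) with ⟨hs, ht⟩ | ⟨hs, ht⟩
      · rw [if_pos hs, if_pos (hcont.mpr ht)]
      · have hs1 : ¬ fre2.size = 1 := by omega
        rw [if_neg hs1, if_pos hs, if_pos ht]
    · rw [if_neg (show ¬(2 ≤ L + 1 ∧ pvCond (pvFre nums (L + 1))) from fun hcc => hc hcc.2)]
      have hc2 : ¬ pvCond fre2 := fun hcc => hc (hcond.mp hcc)
      by_cases hs1 : fre2.size = 1
      · rw [if_pos hs1, if_neg (fun hct => hc2 (hdef.mpr (Or.inl ⟨hs1, hcont.mp hct⟩)))]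
      · rw [if_neg hs1]
        by_cases hs2 : fre2.size = 2
        · rw [if_pos hs2, if_neg (fun hT => hc2 (hdef.mpr (Or.inr ⟨hs2, hT⟩)))]
        · rw [if_neg hs2]
  · have hL0 : L = 0 := by omega
    rw [if_neg hL, if_neg (show ¬(2 ≤ L + 1 ∧ pvCond (pvFre nums (L + 1))) from fun hcc => absurd hcc.1 (by omega))]

-- ===== B's fold maintains (counts, count frequencies, best) for every prefix =====
theorem pv_b_invariant (nums : List Int) : ∀ L : Nat, L ≤ nums.length →
    pvEqv ((PySem.List.enumerate (nums.take L)).foldl pvBStep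
        (PySem.Dict.empty, PySem.Dict.empty, 0)).1 (PySem.Dict.counter (nums.take L)) ∧
    pvEqv ((PySem.List.enumerate (nums.take L)).foldl pvBStep
        (PySem.Dict.empty, PySem.Dict.empty, 0)).2.1 (pvFre nums L) ∧
    ((PySem.List.enumerate (nums.take L)).foldl pvBStep
        (PySem.Dict.empty, PySem.Dict.empty, 0)).2.2 = pvBest nums L := by
  intro L
  induction L with
  | zero =>
    intro _
    have hnil : nums.take 0 = [] := rfl
    have hnd : (PySem.Dict.empty : PySem.Dict Int Int).keys.Nodup := by
      simp [PySem.Dict.keys, PySem.Dict.empty]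
    refine ⟨⟨hnd, ?_, fun k => rfl⟩, ⟨hnd, ?_, fun k => rfl⟩, rfl⟩
    · exact PySem.Dict.nodup_keys_counter _
    · exact PySem.Dict.nodup_keys_counter _
  | succ L ih =>
    intro hL
    have hlt : L < nums.length := by omega
    obtain ⟨ih1, ih2, ih3⟩ := ih (by omega)
    have hlen : (nums.take L).length = L := by simp; omega
    have henum : PySem.List.enumerate (nums.take (L + 1)) 0 =
        PySem.List.enumerate (nums.take L) 0 ++ [((L : Int), nums[L])] := by
      rw [pv_take_succ nums L hlt, PySem.List.enumerate_append]
      simp [hlen, PySem.List.enumerate]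
    rw [henum, List.foldl_append]
    set st := (PySem.List.enumerate (nums.take L)).foldl pvBStep
        (PySem.Dict.empty, PySem.Dict.empty, 0) with hst
    have hc : st.1.getD nums[L] 0 = (((nums.take L).count nums[L] : Int)) := by
      rw [pv_eqv_getD ih1, PySem.Dict.getD_counter]
    show pvEqv (pvBStep st ((L : Int), nums[L])).1 (PySem.Dict.counter (nums.take (L + 1))) ∧
      pvEqv (pvBStep st ((L : Int), nums[L])).2.1 (pvFre nums (L + 1)) ∧
      (pvBStep st ((L : Int), nums[L])).2.2 = pvBest nums (L + 1)
    rw [pvBStep]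
    refine ⟨?_, ?_, ?_⟩
    · exact pv_cnt_step nums L hlt st.1 ih1
    · exact pv_fre_step nums L hlt st.2.1 ih2 _ hc _ _ rfl rfl
    · have hfre2 := pv_fre_step nums L hlt st.2.1 ih2 _ hc _ _ rfl rfl
      have := pv_bbest nums L _ hfre2 st.2.2
      rw [this, ih3, pvBest]

-- ===== A's pieces: the counting loops, the inline decision, and the backward scan =====
theorem pv_countUp_eq : pvCountUp = fun d k => d.insert k (d.getD k 0 + 1) := by
  funext d k
  unfold pvCountUp
  by_cases hc : d.contains k
  · rw [if_pos hc]
  · rw [if_neg hc, PySem.Dict.getD_of_not_contains _ _ (by simpa using hc)]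
    norm_num

theorem pv_hmd (nums : List Int) (L : Nat) (hm : PySem.Dict Int Int)
    (hE : pvEqv hm (PySem.Dict.counter (nums.take L))) :
    pvEqv (hm.items.foldl (fun d p => pvCountUp d p.2) PySem.Dict.empty) (pvFre nums L) := by
  have h1 : hm.items.foldl (fun d p => pvCountUp d p.2) PySem.Dict.empty =
      PySem.Dict.counter hm.values := by
    rw [pv_countUp_eq, ← PySem.Dict.foldl_insert_getD_add_one_eq_counter hm.values]
    have : hm.values = hm.items.map (fun p => p.2) := rfl
    rw [this, List.foldl_map]
  have hperm : hm.values.Perm (pvCs nums L) := by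
    rw [PySem.Dict.values_eq_map_keys hm hE.1 0]
    have h2 : pvCs nums L =
        (PySem.Dict.counter (nums.take L)).keys.map
          (fun k => (PySem.Dict.counter (nums.take L)).getD k 0) :=
      PySem.Dict.values_eq_map_keys _ (PySem.Dict.nodup_keys_counter _) 0
    rw [h2]
    have h3 : hm.keys.map (fun k => hm.getD k 0) =
        hm.keys.map (fun k => (PySem.Dict.counter (nums.take L)).getD k 0) :=
      List.map_congr_left (fun k _ => pv_eqv_getD hE k)
    rw [h3]
    exact (pv_eqv_keys_perm hE).map _
  rw [h1]
  exact ⟨PySem.Dict.nodup_keys_counter _, PySem.Dict.nodup_keys_counter _,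
    fun v => pv_counter_perm_get? hperm v⟩

theorem pv_adec (nums : List Int) (L : Nat) (hmd : PySem.Dict Int Int)
    (hE : pvEqv hmd (pvFre nums L)) (r els : Int) :
    (if hmd.size = 1 ∧ (hmd.get? 1).getD 0 ≠ 0 then r
     else if hmd.size = 2 ∧ hmd.get? 1 = some 1 then r
     else if hmd.size = 2 ∧
         ((PySem.List.max? hmd.keys id).getD 0 - (PySem.List.min? hmd.keys id).getD 0 = 1 ∧
          (hmd.getD ((PySem.List.max? hmd.keys id).getD 0) 0 = 1 ∨
           hmd.getD ((PySem.List.min? hmd.keys id).getD 0) 0 = 1)) then r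
     else els) = @ite _ (pvCond (pvFre nums L)) (Classical.propDecidable _) r els := by
  have hdef : pvCond hmd ↔
      (hmd.size = 1 ∧ (hmd.get? 1).getD 0 ≠ 0) ∨
      (hmd.size = 2 ∧ (hmd.get? 1 = some 1 ∨
        ((PySem.List.max? hmd.keys id).getD 0 - (PySem.List.min? hmd.keys id).getD 0 = 1 ∧
         (hmd.getD ((PySem.List.max? hmd.keys id).getD 0) 0 = 1 ∨
          hmd.getD ((PySem.List.min? hmd.keys id).getD 0) 0 = 1)))) := Iff.rfl
  have hcond := pv_cond_congr hE
  by_cases hc : pvCond (pvFre nums L)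
  · rw [if_pos hc]
    rcases hdef.mp (hcond.mpr hc) with ⟨hs, ht⟩ | ⟨hs, ht⟩
    · rw [if_pos ⟨hs, ht⟩]
    · have hs1 : ¬(hmd.size = 1 ∧ (hmd.get? 1).getD 0 ≠ 0) := fun hh => by omega
      rcases ht with ht | ht
      · rw [if_neg hs1, if_pos ⟨hs, ht⟩]
      · have hs2 : ¬(hmd.size = 2 ∧ hmd.get? 1 = some 1) ∨
            (hmd.size = 2 ∧ hmd.get? 1 = some 1) := by tauto
        rcases hs2 with hs2 | hs2
        · rw [if_neg hs1, if_neg hs2, if_pos ⟨hs, ht⟩]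
        · rw [if_neg hs1, if_pos hs2]
  · rw [if_neg hc]
    have hc2 : ¬ pvCond hmd := fun hcc => hc (hcond.mp hcc)
    rw [if_neg (fun hh => hc2 (hdef.mpr (Or.inl hh))),
      if_neg (fun hh => hc2 (hdef.mpr (Or.inr ⟨hh.1, Or.inl hh.2⟩))),
      if_neg (fun hh => hc2 (hdef.mpr (Or.inr ⟨hh.1, Or.inr hh.2⟩)))]

theorem pv_pyget_neg (nums : List Int) (j : Nat) (h : j < nums.length) :
    (PySem.List.pyGet? nums ((j : Int) - nums.length)).getD 0 = nums[j] := by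
  have hneg : ¬ (0 : Int) ≤ (j : Int) - nums.length := by omega
  have hge : -(nums.length : Int) ≤ (j : Int) - nums.length := by omega
  simp only [PySem.List.pyGet?, PySem.List.pyIdx?, if_neg hneg, if_pos hge]
  have : nums.length - (-((j : Int) - nums.length)).toNat = j := by omega
  rw [this]
  simp [List.getElem?_eq_getElem h]

-- A's downward scan with early return, as a function of the prefix length
noncomputable def pvSD (nums : List Int) : Nat → Int
  | 0 => 0
  | 1 => 0
  | (L + 2) => @ite _ (pvCond (pvFre nums (L + 2))) (Classical.propDecidable _)
      ((L : Int) + 2) (pvSD nums (L + 1))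

theorem pv_sd_eq_best (nums : List Int) : ∀ L : Nat, pvSD nums L = pvBest nums L := by
  intro L
  induction L with
  | zero => rfl
  | succ L ih =>
    match L, ih with
    | 0, _ => simp [pvSD, pvBest]
    | (K + 1), ih =>
      rw [pvSD, pvBest]
      by_cases hc : pvCond (pvFre nums (K + 1 + 1))
      · rw [if_pos hc, if_pos ⟨by omega, hc⟩]
        push_cast
        ring
      · rw [if_neg hc, if_neg (fun hh => hc hh.2), ih]

theorem pv_aloop (nums : List Int) : ∀ L : Nat, (hm : PySem.Dict Int Int) →
    L + 1 ≤ nums.length → pvEqv hm (PySem.Dict.counter (nums.take (L + 1))) →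
    pvALoop nums nums.length
      (PySem.List.pyRange (((L : Int) + 1) - 1 - nums.length) (-(nums.length : Int)) (-1)) hm
      = pvSD nums (L + 1) := by
  intro L
  induction L with
  | zero =>
    intro hm hlen _
    rw [PySem.List.pyRange_neg_one_eq_nil (by omega)]
    rfl
  | succ L ih =>
    intro hm hlen hE
    have hlt : L + 1 < nums.length := by omega
    rw [PySem.List.pyRange_neg_one_cons (by omega)]
    rw [pvALoop]
    have hhmd := pv_hmd nums (L + 2) hm hE
    rw [pv_adec nums (L + 2) _ hhmd]
    by_cases hc : pvCond (pvFre nums (L + 2))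
    · rw [if_pos hc]
      show _ = pvSD nums (L + 1 + 1)
      rw [pvSD, if_pos hc]
      push_cast
      ring
    · rw [if_neg hc]
      have hxcast : (((L + 1 : Nat) : Int) + 1) - 1 - nums.length
          = ((L + 1 : Nat) : Int) - nums.length := by push_cast; ring
      rw [hxcast, pv_pyget_neg nums (L + 1) hlt]
      have hdec := pv_dec_step nums (L + 1) hlt hm hE
      show pvALoop nums (nums.length : Int)
          (PySem.List.pyRange (((L + 1 : Nat) : Int) - nums.length - 1)
            (-(nums.length : Int)) (-1))
          (if hm.getD nums[L + 1] 0 - 1 = 0 then hm.erase nums[L + 1]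
           else hm.insert nums[L + 1] (hm.getD nums[L + 1] 0 - 1)) = pvSD nums (L + 1 + 1)
      have harg : ((L + 1 : Nat) : Int) - nums.length - 1
          = (((L : Nat) : Int) + 1) - 1 - nums.length := by push_cast; ring
      rw [harg, ih _ (by omega) hdec]
      show pvSD nums (L + 1) = pvSD nums (L + 1 + 1)
      rw [pvSD, if_neg hc]

theorem maxEqualFreq_A_eq (nums : List Int) : maxEqualFreq nums = pvBest nums nums.length := by
  have hm0 : nums.foldl pvCountUp PySem.Dict.empty = PySem.Dict.counter nums := by
    rw [pv_countUp_eq]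
    exact PySem.Dict.foldl_insert_getD_add_one_eq_counter nums
  rcases Nat.eq_zero_or_pos nums.length with h0 | hpos
  · have hnil : nums = [] := List.eq_nil_of_length_eq_zero h0
    subst hnil
    decide
  · obtain ⟨K, hK⟩ : ∃ K, nums.length = K + 1 := ⟨nums.length - 1, by omega⟩
    have htake : nums.take (K + 1) = nums := by rw [← hK]; exact List.take_length
    show pvALoop nums nums.length
        (PySem.List.pyRange (-1) (-(nums.length : Int)) (-1))
        (nums.foldl pvCountUp PySem.Dict.empty) = pvBest nums nums.length
    rw [hm0]
    have hE : pvEqv (PySem.Dict.counter nums) (PySem.Dict.counter (nums.take (K + 1))) := by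
      rw [htake]
      exact pv_eqv_refl _ (PySem.Dict.nodup_keys_counter _)
    have hstart : (((K : Nat) : Int) + 1) - 1 - (nums.length : Int) = -1 := by
      rw [hK]; push_cast; ring
    have := pv_aloop nums K (PySem.Dict.counter nums) (by omega) hE
    rw [hstart] at this
    rw [this, pv_sd_eq_best, hK]

theorem maxEqualFreq_B_eq (nums : List Int) : maxEqualFreq_alt nums = pvBest nums nums.length := by
  have h := (pv_b_invariant nums nums.length le_rfl).2.2
  rw [List.take_length] at h
  exact h


-- ===== VERDICT (by name: the statement is the Claim_ definition above) =====
theorem maxEqualFreq_spec : Claim_equal_maxEqualFreq := by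
  intro nums _
  unfold Spec_maxEqualFreq
  rw [maxEqualFreq_A_eq, maxEqualFreq_B_eq]
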